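-- pv_equiv track=rewrite | github.com/runnerdave/python-prac | katas/cantorsequence.py | cantor_sequence
-- ===== SOURCE A (Python) =====
-- def cantor_sequence(n):
--     """Generate the first nth term of the Cantor sequence."""
--     matrix_size = n//2 + 1
--     matrix = [[(i+1, j+1) for j in range(matrix_size)]
--               for i in range(matrix_size)]
--     a = 0
--     b = 0
--     term = matrix[a][b]
--     if n == 1:
--         return '1/1'
--     while n > 1:
--         # step right
--         if a == 0 and n > 1:
--             b = b + 1
--             n = n - 1
--         # down and left
--         while b > 0 and n > 1:
--             b = b - 1
--             a = a + 1
--             n = n - 1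
--         # down
--         if b == 0 and n > 1:
--             a = a + 1
--             n = n - 1
--         # up and right
--         while a > 0 and n > 1:
--             b = b + 1
--             a = a - 1
--             n = n - 1
--     term = matrix[a][b]
--     return f'{term[0]}/{term[1]}'
-- ===== SOURCE B (Python) =====
-- def cantor_sequence(n):
--     """Generate the first nth term of the Cantor sequence (closed diagonal form)."""
--     if n <= 1:
--         return '1/1'
--     # find the diagonal d (1-based) containing term n: T(d-1) < n <= T(d)
--     d = 0
--     t = 0
--     while t < n:
--         d += 1
--         t += d
--     k = n - (t - d)  # 1-based position along diagonal d
--     if d % 2 == 1: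
--         return f'{d + 1 - k}/{k}'
--     return f'{k}/{d + 1 - k}'
-- ===== Notes on version B (the rewrite author's own statement) =====
-- stated objective: faster
-- what changed: Replaces the step-by-step zigzag walk over an explicitly built (n//2+1)^2 matrix by locating the containing diagonal d with T(d-1) < n <= T(d) via a running triangular sum and emitting the fraction directly from the position on that diagonal.
import Mathlib
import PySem

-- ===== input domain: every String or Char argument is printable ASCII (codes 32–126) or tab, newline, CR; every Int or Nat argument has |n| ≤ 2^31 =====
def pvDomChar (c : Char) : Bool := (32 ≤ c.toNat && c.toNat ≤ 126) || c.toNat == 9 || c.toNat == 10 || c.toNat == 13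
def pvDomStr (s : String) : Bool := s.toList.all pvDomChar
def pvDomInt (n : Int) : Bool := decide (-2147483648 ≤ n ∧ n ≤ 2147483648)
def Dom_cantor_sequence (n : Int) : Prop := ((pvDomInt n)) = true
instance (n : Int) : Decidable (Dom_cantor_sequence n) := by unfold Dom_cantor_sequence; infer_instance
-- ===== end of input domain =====

-- B replaces A's step-by-step zigzag walk over an explicitly built matrix by locating
-- the containing anti-diagonal with a running triangular sum (objective: faster).

-- ===== PORT A =====
-- inner 'down and left' while-loop of A: while b > 0 and n > 1: b -= 1; a += 1; n -= 1
def pvLoopDL (a b n : Int) : Int × Int × Int :=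
  if h : b > 0 ∧ n > 1 then pvLoopDL (a + 1) (b - 1) (n - 1) else (a, b, n)
termination_by n.toNat
decreasing_by omega

-- inner 'up and right' while-loop of A: while a > 0 and n > 1: b += 1; a -= 1; n -= 1
def pvLoopUR (a b n : Int) : Int × Int × Int :=
  if h : a > 0 ∧ n > 1 then pvLoopUR (a - 1) (b + 1) (n - 1) else (a, b, n)
termination_by n.toNat
decreasing_by omega

-- outer 'while n > 1' loop of A; the fuel argument only makes the recursion structural
-- (each iteration decreases n by at least 1, so fuel = n.toNat never runs out)
def pvLoopOuter : Nat → Int → Int → Int → Int × Int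
  | 0, a, b, _ => (a, b)
  | fuel + 1, a, b, n =>
    if n > 1 then
      let s1 := if a = 0 ∧ n > 1 then (a, b + 1, n - 1) else (a, b, n)
      let s2 := pvLoopDL s1.1 s1.2.1 s1.2.2
      let s3 := if s2.2.1 = 0 ∧ s2.2.2 > 1 then (s2.1 + 1, s2.2.1, s2.2.2 - 1) else s2
      let s4 := pvLoopUR s3.1 s3.2.1 s3.2.2
      pvLoopOuter fuel s4.1 s4.2.1 s4.2.2
    else (a, b)

def cantor_sequence (n : Int) : String :=
  let matrix_size := PySem.Int.floordiv n 2 + 1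
  let matrix := (PySem.List.pyRange 0 matrix_size 1).map
    (fun i => (PySem.List.pyRange 0 matrix_size 1).map (fun j => (i + 1, j + 1)))
  -- term = matrix[0][0]  (this is where A raises on negative input; excluded by Pre_)
  let _term0 := PySem.List.pyGetD (PySem.List.pyGetD matrix 0 []) 0 ((0 : Int), (0 : Int))
  if n = 1 then "1/1"
  else
    let p := pvLoopOuter n.toNat 0 0 n
    let term := PySem.List.pyGetD (PySem.List.pyGetD matrix p.1 []) p.2 ((0 : Int), (0 : Int))
    PySem.Int.toStr term.1 ++ "/" ++ PySem.Int.toStr term.2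

-- ===== PORT B =====
-- B's 'while t < n: d += 1; t += d' loop; fuel = n.toNat only makes it structural
def pvFindD : Nat → Int → Int → Int → Int × Int
  | 0, d, t, _ => (d, t)
  | fuel + 1, d, t, n => if t < n then pvFindD fuel (d + 1) (t + (d + 1)) n else (d, t)

def cantor_sequence_alt (n : Int) : String :=
  if n ≤ 1 then "1/1"
  else
    let p := pvFindD n.toNat 0 0 n
    let k := n - (p.2 - p.1)
    if PySem.Int.mod p.1 2 = 1 then
      PySem.Int.toStr (p.1 + 1 - k) ++ "/" ++ PySem.Int.toStr k
    else
      PySem.Int.toStr k ++ "/" ++ PySem.Int.toStr (p.1 + 1 - k)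

-- ===== PRECONDITION & SPEC =====
-- Pre_ excludes exactly the negative inputs, on which A raises IndexError (its matrix is empty there)
def Pre_cantor_sequence (n : Int) : Prop := 0 ≤ n
instance (n : Int) : Decidable (Pre_cantor_sequence n) := by unfold Pre_cantor_sequence; infer_instance
def pvWitness_cantor_sequence : Int := (5)

def Spec_cantor_sequence (n : Int) (out : String) : Prop := out = cantor_sequence_alt n
instance (n : Int) (out : String) : Decidable (Spec_cantor_sequence n out) := by unfold Spec_cantor_sequence; infer_instance

-- ===== CLAIM (what is proved, stated in full; the proofs are below) =====
def Claim_equal_cantor_sequence : Prop := ∀ (n : Int), Dom_cantor_sequence n → Pre_cantor_sequence n → Spec_cantor_sequence n (cantor_sequence n)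

-- ===== LEMMAS AND PROOFS =====

-- the 0-based position B's arithmetic assigns to term m (proof-only helper)
def pvPos (m : Int) : Int × Int :=
  let p := pvFindD m.toNat 0 0 m
  let k := m - (p.2 - p.1)
  if p.1 % 2 = 1 then (p.1 - k, k - 1) else (k - 1, p.1 - k)

theorem pvLoopDL_closed (a b n : Int) :
    pvLoopDL a b n = (a + max 0 (min b (n - 1)), b - max 0 (min b (n - 1)), n - max 0 (min b (n - 1))) := by
  fun_induction pvLoopDL a b n with
  | case1 a b n h ih =>
    rw [ih]
    refine Prod.ext ?_ (Prod.ext ?_ ?_) <;> simp <;> omega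
  | case2 a b n h =>
    refine Prod.ext ?_ (Prod.ext ?_ ?_) <;> simp <;> omega

theorem pvLoopUR_closed (a b n : Int) :
    pvLoopUR a b n = (a - max 0 (min a (n - 1)), b + max 0 (min a (n - 1)), n - max 0 (min a (n - 1))) := by
  fun_induction pvLoopUR a b n with
  | case1 a b n h ih =>
    rw [ih]
    refine Prod.ext ?_ (Prod.ext ?_ ?_) <;> simp <;> omega
  | case2 a b n h =>
    refine Prod.ext ?_ (Prod.ext ?_ ?_) <;> simp <;> omega

theorem pvLoopOuter_exit (fuel : Nat) (a b n : Int) (h : ¬ n > 1) :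
    pvLoopOuter fuel a b n = (a, b) := by
  cases fuel <;> simp [pvLoopOuter, h]

theorem pvLoopOuter_step0 (fuel : Nat) (b n : Int) (h : n > 1) :
    pvLoopOuter (fuel + 1) 0 b n =
      (let s2 := pvLoopDL 0 (b + 1) (n - 1)
       let s3 := if s2.2.1 = 0 ∧ s2.2.2 > 1 then (s2.1 + 1, s2.2.1, s2.2.2 - 1) else s2
       let s4 := pvLoopUR s3.1 s3.2.1 s3.2.2
       pvLoopOuter fuel s4.1 s4.2.1 s4.2.2) := by
  simp [pvLoopOuter, h]

theorem pvFindD_from (fuel : Nat) (j t m d td : Int) (hj : 0 ≤ j) (hjd : j ≤ d)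
    (ht : 2 * t = j * (j + 1)) (htd : 2 * td = d * (d + 1))
    (hlow : (d - 1) * d < 2 * m) (hhigh : 2 * m ≤ d * (d + 1))
    (hfuel : d - j ≤ fuel) :
    pvFindD fuel j t m = (d, td) := by
  induction fuel generalizing j t with
  | zero =>
    have hjd' : j = d := by omega
    subst hjd'
    have : t = td := by omega
    simp [pvFindD, this]
  | succ fuel ih =>
    rcases eq_or_lt_of_le hjd with rfl | hlt
    · have htt : t = td := by omega
      have hnot : ¬ t < m := by omega
      rw [pvFindD, if_neg hnot, htt]
    · have hstep : t < m := by
        nlinarith [mul_le_mul (by omega : j ≤ d - 1) (by omega : j + 1 ≤ d)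
          (by omega : (0:Int) ≤ j + 1) (by omega : (0:Int) ≤ d - 1)]
      rw [pvFindD, if_pos hstep]
      exact ih (j + 1) (t + (j + 1)) (by omega) (by omega) (by ring_nf; ring_nf at ht; omega) (by omega)

theorem pv_d_le (m d : Int) (hd : 1 ≤ d) (hlow : (d - 1) * d < 2 * m) : d ≤ m := by
  have h12 : (0:Int) ≤ (d - 1) * (d - 2) := by
    rcases lt_or_ge d 2 with h | h
    · have : d = 1 := by omega
      simp [this]
    · exact mul_nonneg (by omega) (by omega)
  nlinarith

theorem pvPos_at (m d t : Int) (hd : 1 ≤ d) (ht : 2 * t = d * (d + 1))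
    (hlow : (d - 1) * d < 2 * m) (hhigh : 2 * m ≤ d * (d + 1)) :
    pvPos m = if d % 2 = 1 then (d - (m - (t - d)), (m - (t - d)) - 1)
              else ((m - (t - d)) - 1, d - (m - (t - d))) := by
  have hdm : d ≤ m := pv_d_le m d hd hlow
  have hm1 : 1 ≤ m := by omega
  have hrw : pvFindD m.toNat 0 0 m = (d, t) := by
    apply pvFindD_from <;> omega
  unfold pvPos
  rw [hrw]

theorem pv_main_loop : ∀ (fuel : Nat) (n k : Int), n.toNat ≤ fuel → 1 ≤ n → 0 ≤ k →
    pvLoopOuter fuel 0 (2 * k) n = pvPos ((k + 1) * (2 * k + 1) + n - 1) := by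
  intro fuel
  induction fuel with
  | zero => intro n k hfuel hn hk; omega
  | succ fuel ih =>
    intro n k hfuel hn hk
    rcases eq_or_lt_of_le hn with rfl | hn2
    · rw [pvLoopOuter_exit _ _ _ _ (by omega)]
      rw [pvPos_at _ (2*k+1) ((k+1)*(2*k+1)) (by omega) (by ring) (by nlinarith) (by nlinarith)]
      rw [if_pos (by omega : (2*k+1) % 2 = 1)]
      refine Prod.ext ?_ ?_ <;> simp
    · rw [pvLoopOuter_step0 _ _ _ hn2]
      simp only [pvLoopDL_closed]
      try dsimp only
      rcases lt_or_ge n (2*k+4) with hA | hBC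
      · rw [show max 0 (min (2*k+1) (n-1-1)) = n - 2 by omega]
        rw [if_neg (by rintro ⟨-, h2⟩; omega)]
        try dsimp only
        rw [pvLoopUR_closed]
        rw [show max 0 (min (0 + (n-2)) (n-1-(n-2)-1)) = 0 by omega]
        try dsimp only
        rw [pvLoopOuter_exit _ _ _ _ (by omega)]
        rw [pvPos_at _ (2*k+2) ((k+1)*(2*k+3)) (by omega) (by ring) (by nlinarith) (by nlinarith)]
        rw [if_neg (by omega : ¬ (2*k+2) % 2 = 1)]
        refine Prod.ext ?_ ?_ <;> simp <;> ring
      · rcases lt_or_ge n (4*k+6) with hC | hD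
        · rw [show max 0 (min (2*k+1) (n-1-1)) = 2*k+1 by omega]
          rw [if_pos (by constructor <;> omega)]
          try dsimp only
          rw [pvLoopUR_closed]
          rw [show max 0 (min (0 + (2*k+1) + 1) (n-1-(2*k+1)-1-1)) = n - (2*k+4) by omega]
          try dsimp only
          rw [pvLoopOuter_exit _ _ _ _ (by omega)]
          rw [pvPos_at _ (2*k+3) ((k+2)*(2*k+3)) (by omega) (by ring) (by nlinarith) (by nlinarith)]
          rw [if_pos (by omega : (2*k+3) % 2 = 1)]
          refine Prod.ext ?_ ?_ <;> simp <;> ring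
        · rw [show max 0 (min (2*k+1) (n-1-1)) = 2*k+1 by omega]
          rw [if_pos (by constructor <;> omega)]
          try dsimp only
          rw [pvLoopUR_closed]
          rw [show max 0 (min (0 + (2*k+1) + 1) (n-1-(2*k+1)-1-1)) = 2*k+2 by omega]
          try dsimp only
          have hrec := ih (n - (4*k+5)) (k+1) (by omega) (by omega) (by omega)
          rw [show (0 + (2*k+1) + 1 - (2*k+2) : Int) = 0 by ring,
              show ((2*k+1) - (2*k+1) + (2*k+2) : Int) = 2*(k+1) by ring,
              show (n-1-(2*k+1)-1-(2*k+2) : Int) = n - (4*k+5) by ring]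
          rw [hrec]
          congr 1
          ring

theorem pv_exists_diag (n : Int) (hn : 1 ≤ n) :
    ∃ d t, 1 ≤ d ∧ 2 * t = d * (d + 1) ∧ (d - 1) * d < 2 * n ∧ 2 * n ≤ d * (d + 1) := by
  induction n, hn using Int.le_induction with
  | base => exact ⟨1, 1, by norm_num⟩
  | succ n hn ih =>
    obtain ⟨d, t, hd, ht, hlow, hhigh⟩ := ih
    by_cases h : 2 * (n + 1) ≤ d * (d + 1)
    · exact ⟨d, t, hd, ht, by nlinarith, h⟩
    · refine ⟨d + 1, t + (d + 1), by omega, by ring_nf; ring_nf at ht; omega, by nlinarith, by nlinarith⟩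

-- ===== VERDICT (by name: the statement is the Claim_ definition above) =====
theorem cantor_sequence_spec : Claim_equal_cantor_sequence := by
  intro n _hdom hpre
  unfold Spec_cantor_sequence
  unfold Pre_cantor_sequence at hpre
  rcases lt_or_ge n 2 with hsmall | hn2
  · interval_cases n <;> decide
  · obtain ⟨d, t, hd, ht, hlow, hhigh⟩ := pv_exists_diag n (by omega)
    have hdn : d ≤ n := pv_d_le n d hd hlow
    have hk1 : 1 ≤ n - (t - d) := by nlinarith
    have hk2 : n - (t - d) ≤ d := by nlinarith
    have hS : d - 1 ≤ PySem.Int.floordiv n 2 := by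
      rw [PySem.Int.le_floordiv_iff_mul_le (by norm_num)]
      have h12 : (0:Int) ≤ (d - 1) * (d - 2) := by
        rcases lt_or_ge d 2 with h | h
        · have : d = 1 := by omega
          simp [this]
        · exact mul_nonneg (by omega) (by omega)
      nlinarith
    have hfind : pvFindD n.toNat 0 0 n = (d, t) := by
      apply pvFindD_from <;> omega
    have hloop : pvLoopOuter n.toNat 0 0 n = pvPos n := by
      have h0 := pv_main_loop n.toNat n 0 (le_refl _) (by omega) (by omega)
      rw [show ((0:Int) + 1) * (2 * 0 + 1) + n - 1 = n by ring, show (2:Int) * 0 = 0 by ring] at h0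
      exact h0
    have hpos := pvPos_at n d t hd ht hlow hhigh
    unfold cantor_sequence cantor_sequence_alt
    rw [if_neg (by omega : ¬ n = 1), if_neg (by omega : ¬ n ≤ 1)]
    simp only [hfind, hloop, hpos]
    rw [PySem.Int.mod_eq_emod_of_pos (by norm_num)]
    by_cases hpar : d % 2 = 1
    · rw [if_pos hpar, if_pos hpar]
      try dsimp only
      rw [PySem.List.pyGetD_map_pyRange_of_nonneg _ _ _ _ (by omega) (by omega)]
      rw [PySem.List.pyGetD_map_pyRange_of_nonneg _ _ _ _ (by omega) (by omega)]
      try dsimp only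
      rw [show d - (n - (t - d)) + 1 = d + 1 - (n - (t - d)) by ring,
          show n - (t - d) - 1 + 1 = n - (t - d) by ring]
    · rw [if_neg hpar, if_neg hpar]
      try dsimp only
      rw [PySem.List.pyGetD_map_pyRange_of_nonneg _ _ _ _ (by omega) (by omega)]
      rw [PySem.List.pyGetD_map_pyRange_of_nonneg _ _ _ _ (by omega) (by omega)]
      try dsimp only
      rw [show n - (t - d) - 1 + 1 = n - (t - d) by ring,
          show d - (n - (t - d)) + 1 = d + 1 - (n - (t - d)) by ring]
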